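-- pv_equiv track=rewrite | github.com/Daeronel/omd | practice2.py | count_nonunique
-- ===== SOURCE A (Python) =====
-- def count_nonunique(input):
--     uniques = {}
--     for item in input:
--         if item not in uniques:
--             uniques[item] = 1
--         else:
--             uniques[item] += 1
--     result = 0
--     for item in uniques:
--         if uniques[item] > 1:
--             result += 1
--     return result
-- ===== SOURCE B (Python) =====
-- def count_nonunique(input):
--     seen = set()
--     duplicates = set()
--     for item in input:
--         if item in seen:
--             duplicates.add(item)
--         else:
--             seen.add(item)
--     return len(duplicates)
-- ===== Notes on version B (the rewrite author's own statement) =====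
-- stated objective: simpler
-- what changed: Replaces the count-dict-then-scan-keys structure with a single pass maintaining two sets (seen, duplicates) and returning len(duplicates); no integer counting and no second loop.
import Mathlib
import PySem

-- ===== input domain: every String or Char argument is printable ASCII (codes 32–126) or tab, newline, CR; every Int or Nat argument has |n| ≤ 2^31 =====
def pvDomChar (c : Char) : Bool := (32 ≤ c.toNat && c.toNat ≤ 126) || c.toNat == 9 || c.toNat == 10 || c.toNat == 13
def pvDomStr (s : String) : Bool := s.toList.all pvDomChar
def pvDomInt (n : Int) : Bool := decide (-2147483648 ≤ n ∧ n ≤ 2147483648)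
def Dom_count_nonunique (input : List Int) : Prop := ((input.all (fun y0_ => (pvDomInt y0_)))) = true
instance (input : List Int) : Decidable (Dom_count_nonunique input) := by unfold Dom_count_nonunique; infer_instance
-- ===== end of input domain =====

-- B replaces A's count-dict + second scan over its keys with a single pass keeping two
-- sets (seen, duplicates) and returning the size of duplicates; objective: simpler.

-- ===== PORT A =====
def count_nonunique (input : List Int) : Int :=
  let uniques : PySem.Dict Int Int :=
    input.foldl
      (fun d item =>
        if d.contains item = false then d.insert item 1
        else d.modify item 0 (· + 1))
      PySem.Dict.empty
  uniques.keys.foldl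
    (fun result item => if uniques.getD item 0 > 1 then result + 1 else result) 0

-- ===== PORT B =====
def count_nonunique_alt (input : List Int) : Int :=
  let st : PySem.Set Int × PySem.Set Int :=
    input.foldl
      (fun p item =>
        if PySem.Set.contains p.1 item then (p.1, PySem.Set.add p.2 item)
        else (PySem.Set.add p.1 item, p.2))
      (PySem.Set.empty, PySem.Set.empty)
  PySem.Set.len st.2

-- ===== PRECONDITION & SPEC =====
def Spec_count_nonunique (input : List Int) (out : Int) : Prop := out = count_nonunique_alt input
instance (input : List Int) (out : Int) : Decidable (Spec_count_nonunique input out) := by unfold Spec_count_nonunique; infer_instance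

-- ===== CLAIM (what is proved, stated in full; the proofs are below) =====
def Claim_equal_count_nonunique : Prop := ∀ (input : List Int), Dom_count_nonunique input → Spec_count_nonunique input (count_nonunique input)

-- ===== LEMMAS AND PROOFS =====

-- A's dict lookup after the counting loop: getD v 0 = start + number of occurrences
lemma a_getD (l : List Int) (d : PySem.Dict Int Int) (v : Int) :
    (l.foldl
      (fun d item =>
        if d.contains item = false then d.insert item 1
        else d.modify item 0 (· + 1)) d).getD v 0 = d.getD v 0 + l.count v := by
  induction l generalizing d with
  | nil => simp
  | cons a t ih =>
      simp only [List.foldl_cons, ih]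
      by_cases h : d.contains a = false
      · by_cases hv : v = a <;>
          · simp [h, PySem.Dict.getD_insert, hv, PySem.Dict.getD_of_not_contains d 0 h,
              List.count_cons]
            omega
      · by_cases hv : v = a <;>
          · simp [h, PySem.Dict.getD_modify, hv, List.count_cons]
            omega

-- membership in the keys of A's dict
lemma a_keys_mem (l : List Int) (d : PySem.Dict Int Int) (x : Int) :
    x ∈ (l.foldl
      (fun d item =>
        if d.contains item = false then d.insert item 1
        else d.modify item 0 (· + 1)) d).keys ↔ x ∈ d.keys ∨ x ∈ l := by
  induction l generalizing d with
  | nil => simp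
  | cons a t ih =>
      simp only [List.foldl_cons, ih]
      by_cases h : d.contains a = false
      · rw [if_pos h, PySem.Dict.keys_insert_of_not_contains d 1 h]
        simp
        tauto
      · rw [if_neg h, PySem.Dict.keys_modify]
        rw [PySem.Dict.mem_keys_insert]
        have ha : a ∈ d.keys := (PySem.Dict.contains_iff_mem_keys d a).mp (by
          cases hc : d.contains a
          · exact absurd hc h
          · rfl)
        simp [List.mem_cons]
        tauto

-- the keys of A's dict stay duplicate-free
lemma a_keys_nodup (l : List Int) (d : PySem.Dict Int Int) (h : d.keys.Nodup) :
    (l.foldl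
      (fun d item =>
        if d.contains item = false then d.insert item 1
        else d.modify item 0 (· + 1)) d).keys.Nodup := by
  induction l generalizing d with
  | nil => simpa
  | cons a t ih =>
      simp only [List.foldl_cons]
      by_cases hc : d.contains a = false
      · rw [if_pos hc]
        refine ih _ ?_
        rw [PySem.Dict.keys_insert_of_not_contains d 1 hc]
        refine List.Nodup.append h (by simp) ?_
        intro y hy hy'
        simp at hy'
        subst hy'
        exact absurd ((PySem.Dict.contains_iff_mem_keys d y).mpr hy) (by simp [hc])
      · rw [if_neg hc]
        refine ih _ ?_
        rw [PySem.Dict.keys_modify]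
        exact PySem.Dict.nodup_keys_insert d a _ h

-- counting fold = length of the filtered list
lemma foldl_count_filter (P : Int → Prop) [DecidablePred P] (l : List Int) (r : Int) :
    l.foldl (fun result item => if P item then result + 1 else result) r
      = r + ((l.filter (fun x => decide (P x))).length : Int) := by
  induction l generalizing r with
  | nil => simp
  | cons a t ih =>
      by_cases h : P a <;> simp [List.foldl, h, ih] <;> ring

-- two duplicate-free lists with the same members have the same length
lemma length_eq_of_nodup_mem (l1 l2 : List Int) (h1 : l1.Nodup) (h2 : l2.Nodup)
    (h : ∀ x, x ∈ l1 ↔ x ∈ l2) : l1.length = l2.length := by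
  have e : l1.toFinset = l2.toFinset := by
    apply Finset.ext
    intro x
    simp [h x]
  have c1 := List.toFinset_card_of_nodup h1
  have c2 := List.toFinset_card_of_nodup h2
  rw [← c1, ← c2, e]

-- invariant of B's single pass: relative to the already-processed prefix p,
-- duplicates is duplicate-free and holds exactly the values occurring ≥ 2 times
lemma b_inv (l p : List Int) (seen dups : PySem.Set Int)
    (hseen : ∀ x : Int, x ∈ seen ↔ x ∈ p)
    (hd : dups.Nodup)
    (hdup : ∀ x : Int, x ∈ dups ↔ 2 ≤ p.count x) :
    (l.foldl
      (fun (q : PySem.Set Int × PySem.Set Int) item =>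
        if PySem.Set.contains q.1 item then (q.1, PySem.Set.add q.2 item)
        else (PySem.Set.add q.1 item, q.2))
      (seen, dups)).2.Nodup ∧
    ∀ x : Int, (x ∈ (l.foldl
      (fun (q : PySem.Set Int × PySem.Set Int) item =>
        if PySem.Set.contains q.1 item then (q.1, PySem.Set.add q.2 item)
        else (PySem.Set.add q.1 item, q.2))
      (seen, dups)).2 ↔ 2 ≤ (p ++ l).count x) := by
  induction l generalizing p seen dups with
  | nil =>
      simp only [List.foldl_nil, List.append_nil]
      exact ⟨hd, hdup⟩
  | cons a t ih =>
      simp only [List.foldl_cons]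
      have hca : PySem.Set.contains seen a = true ↔ a ∈ p := by
        simp [PySem.Set.contains, hseen a]
      by_cases hmem : a ∈ p
      · rw [if_pos (hca.mpr hmem)]
        have h1 : ∀ x : Int, x ∈ seen ↔ x ∈ p ++ [a] := by
          intro x; simp [hseen x]
          intro hx; subst hx; exact hmem
        have h2 : (PySem.Set.add dups a).Nodup := by
          unfold PySem.Set.add
          split
          · exact hd
          · rename_i hc
            refine List.Nodup.append hd (by simp) ?_
            intro x hx hx'
            simp at hx'
            subst hx'
            simp [PySem.Set.contains] at hc
            exact hc hx
        have h3 : ∀ x : Int, x ∈ PySem.Set.add dups a ↔ 2 ≤ (p ++ [a]).count x := by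
          intro x
          rw [PySem.Set.mem_add, hdup x]
          by_cases hx : x = a
          · subst hx
            have hc1 : 1 ≤ p.count x := List.one_le_count_iff.mpr hmem
            simp [List.count_append]
            omega
          · simp [List.count_append, Ne.symm hx]
            exact fun h => absurd h hx
        have := ih (p ++ [a]) seen (PySem.Set.add dups a) h1 h2 h3
        simpa [List.append_assoc] using this
      · rw [if_neg (fun h => hmem (hca.mp h))]
        have h1 : ∀ x : Int, x ∈ PySem.Set.add seen a ↔ x ∈ p ++ [a] := by
          intro x
          rw [PySem.Set.mem_add, hseen x]
          simp
        have h3 : ∀ x : Int, x ∈ dups ↔ 2 ≤ (p ++ [a]).count x := by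
          intro x
          rw [hdup x]
          by_cases hx : x = a
          · subst hx
            have hc0 : p.count x = 0 := List.count_eq_zero.mpr hmem
            simp [List.count_append, hc0]
          · simp [List.count_append, Ne.symm hx]
        have := ih (p ++ [a]) (PySem.Set.add seen a) dups h1 hd h3
        simpa [List.append_assoc] using this

-- ===== VERDICT (by name: the statement is the Claim_ definition above) =====
theorem count_nonunique_spec : Claim_equal_count_nonunique := by
  unfold Claim_equal_count_nonunique
  intro input _
  unfold Spec_count_nonunique count_nonunique count_nonunique_alt
  simp only []
  set step := fun (d : PySem.Dict Int Int) (item : Int) =>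
    if d.contains item = false then d.insert item 1
    else d.modify item 0 (· + 1) with hstep
  set uniques := input.foldl step PySem.Dict.empty with hu
  -- A's value: length of keys filtered by count > 1
  have hgetD : ∀ v : Int, uniques.getD v 0 = (input.count v : Int) := by
    intro v
    rw [hu, hstep]
    rw [a_getD input PySem.Dict.empty v]
    simp
  have hkeys_mem : ∀ x : Int, x ∈ uniques.keys ↔ x ∈ input := by
    intro x
    rw [hu, hstep, a_keys_mem]
    simp
  have hkeys_nodup : uniques.keys.Nodup := by
    rw [hu, hstep]
    exact a_keys_nodup input PySem.Dict.empty (by simp)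
  rw [foldl_count_filter (fun item => uniques.getD item 0 > 1) uniques.keys 0]
  simp only [PySem.Set.len]
  -- B's value
  have hb := b_inv input [] PySem.Set.empty PySem.Set.empty
    (by intro x; simp [PySem.Set.empty]) (by simp [PySem.Set.empty])
    (by intro x; simp [PySem.Set.empty])
  rcases hb with ⟨hbnodup, hbmem⟩
  have hlen : (uniques.keys.filter (fun item => decide (uniques.getD item 0 > 1))).length =
      (List.foldl
        (fun (q : PySem.Set Int × PySem.Set Int) item =>
          if PySem.Set.contains q.1 item then (q.1, PySem.Set.add q.2 item)
          else (PySem.Set.add q.1 item, q.2))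
        (PySem.Set.empty, PySem.Set.empty) input).2.length := by
    apply length_eq_of_nodup_mem _ _ (hkeys_nodup.filter _) hbnodup
    intro x
    rw [List.mem_filter, hbmem x]
    simp only [List.nil_append]
    rw [hkeys_mem x]
    constructor
    · rintro ⟨hx, hgt⟩
      rw [hgetD x] at hgt
      have : 1 < input.count x := by exact_mod_cast (by simpa using hgt)
      omega
    · intro hx
      have hm : x ∈ input := List.one_le_count_iff.mp (by omega)
      refine ⟨hm, ?_⟩
      rw [hgetD x]
      simp only [decide_eq_true_eq]
      exact_mod_cast (by omega : (1 : Nat) < input.count x)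
  rw [hlen]
  ring
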